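-- pv_equiv track=rewrite | github.com/yaskhan/py2php | wrapper_gen.py | to_lower
-- ===== SOURCE A (Python) =====
-- def to_lower(txt):
--     if not txt: return
--     spl = txt.split("\\")
--     if len(spl) == 1:
--         return txt
--     qwe = []
--     for d in spl[:-1]:
--         qwe.append(d.lower())
--     qwe.append(spl[-1:][0])
--     return ".".join(qwe)
-- ===== SOURCE B (Python) =====
-- def to_lower(txt):
--     if not txt:
--         return
--     head, sep, tail = txt.rpartition('\\')
--     if not sep:
--         return txt
--     return head.lower().replace('\\', '.') + '.' + tail
-- ===== Notes on version B (the rewrite author's own statement) =====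
-- stated objective: idiomatic
-- what changed: Replaces the split/accumulator-loop/join with a single rpartition at the last backslash: the whole prefix is lowercased and its backslashes turned into dots by one replace, no list of segments is built.
import Mathlib
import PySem

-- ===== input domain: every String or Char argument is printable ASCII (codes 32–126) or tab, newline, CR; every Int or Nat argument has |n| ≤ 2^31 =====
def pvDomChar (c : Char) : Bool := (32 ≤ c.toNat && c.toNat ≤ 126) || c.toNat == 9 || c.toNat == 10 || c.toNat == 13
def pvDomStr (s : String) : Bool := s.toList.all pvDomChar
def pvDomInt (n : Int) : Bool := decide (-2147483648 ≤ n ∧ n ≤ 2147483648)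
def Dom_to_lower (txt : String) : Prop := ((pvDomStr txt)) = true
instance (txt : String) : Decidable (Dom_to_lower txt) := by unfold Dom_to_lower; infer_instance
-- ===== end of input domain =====

-- B replaces A's split/loop/join with a single rpartition at the last backslash (idiomatic rewrite, same cost).


-- ===== PORT A =====
-- if not txt: return / spl = txt.split("\\") / lowercase all but last, append last, join with "."
def to_lower (txt : String) : Option String :=
  if PySem.Str.len txt = 0 then none
  else
    let spl := PySem.Chars.splitOn txt.toList ['\\']
    if spl.length = 1 then some txt
    else
      let qwe := (PySem.List.slice spl none (some (-1))).foldl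
        (fun acc d => acc ++ [PySem.Chars.lower d]) ([] : List (List Char))
      -- spl[-1:][0]: the slice is nonempty because split never returns an empty list
      let qwe := qwe ++ [(PySem.List.slice spl (some (-1)) none).headD []]
      some (String.mk (PySem.Chars.join ['.'] qwe))

-- ===== PORT B =====
-- txt.rpartition('\\') ported by hand via Chars.rfind (exact: rpartition splits at the highest occurrence)
def to_lower_alt (txt : String) : Option String :=
  if PySem.Str.len txt = 0 then none
  else
    let cs := txt.toList
    let i := PySem.Chars.rfind cs ['\\']
    if i = -1 then some txt  -- sep == '': no backslash, return txt unchanged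
    else
      let head := cs.take i.toNat
      let tail := cs.drop (i.toNat + 1)
      some (String.mk (PySem.Chars.replace (PySem.Chars.lower head) ['\\'] ['.'] ++ ['.'] ++ tail))

-- ===== PRECONDITION & SPEC =====
def Spec_to_lower (txt : String) (out : Option String) : Prop := out = to_lower_alt txt
instance (txt : String) (out : Option String) : Decidable (Spec_to_lower txt out) := by unfold Spec_to_lower; infer_instance

-- ===== CLAIM (what is proved, stated in full; the proofs are below) =====
def Claim_equal_to_lower : Prop := ∀ (txt : String), Dom_to_lower txt → Spec_to_lower txt (to_lower txt)

-- ===== LEMMAS AND PROOFS =====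

-- reference split on a single backslash separator
def splitBS : List Char → List (List Char)
  | [] => [[]]
  | c :: t =>
    if c = '\\' then [] :: splitBS t
    else
      match splitBS t with
      | p :: ps => (c :: p) :: ps
      | [] => [[c]]

def convBS (c : Char) : Char := if c = '\\' then '.' else PySem.Chars.lowerChar c

theorem splitBS_nil : splitBS [] = [[]] := rfl

theorem splitBS_cons_bs (t : List Char) : splitBS ('\\' :: t) = [] :: splitBS t := by
  rw [splitBS, if_pos rfl]

theorem splitBS_cons (c : Char) (t p : List Char) (ps : List (List Char))
    (hc : ¬ c = '\\') (h : splitBS t = p :: ps) : splitBS (c :: t) = (c :: p) :: ps := by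
  rw [splitBS, if_neg hc, h]

theorem splitBS_ne_nil (l : List Char) : splitBS l ≠ [] := by
  induction l with
  | nil => simp [splitBS_nil]
  | cons c t ih =>
    by_cases hc : c = '\\'
    · subst hc; rw [splitBS_cons_bs]; simp
    · cases hst : splitBS t with
      | nil => exact absurd hst ih
      | cons p ps => rw [splitBS_cons c t p ps hc hst]; simp

theorem isPrefixOf_bs (l : List Char) :
    List.isPrefixOf ['\\'] l = true ↔ ∃ t, l = '\\' :: t := by
  cases l with
  | nil => simp [List.isPrefixOf]
  | cons c t =>
    rw [List.isPrefixOf_iff_prefix, List.cons_prefix_cons]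
    constructor
    · rintro ⟨h, -⟩; exact ⟨t, by rw [h]⟩
    · rintro ⟨t', ht'⟩; injection ht' with h1 _; exact ⟨h1.symm, by simp⟩

theorem splitOn_go_eq (l : List Char) : ∀ (fuel : Nat) (cur : List Char) (acc : List (List Char)),
    l.length < fuel →
    PySem.Chars.splitOn.go ['\\'] fuel l cur acc =
      acc.reverse ++ ((cur.reverse ++ (splitBS l).headD []) :: (splitBS l).tail) := by
  induction l with
  | nil =>
    intro fuel cur acc h
    match fuel with
    | f + 1 => simp [PySem.Chars.splitOn.go, splitBS_nil]
  | cons c t ih =>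
    intro fuel cur acc h
    match fuel with
    | f + 1 =>
      rw [PySem.Chars.splitOn.go]
      by_cases hc : c = '\\'
      · have hp : List.isPrefixOf ['\\'] (c :: t) = true := by
          rw [isPrefixOf_bs]; exact ⟨t, by rw [hc]⟩
        rw [if_pos hp]
        have hrec := ih f [] (cur.reverse :: acc) (by simpa using Nat.lt_of_succ_lt_succ h)
        simp only [List.length_cons, List.length_nil, Nat.zero_add, List.drop_succ_cons,
          List.drop_zero] at hrec ⊢
        rw [hrec]
        subst hc
        rw [splitBS_cons_bs]
        cases hst : splitBS t with
        | nil => exact absurd hst (splitBS_ne_nil t)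
        | cons p ps => simp
      · have hp : List.isPrefixOf ['\\'] (c :: t) = false := by
          rw [Bool.eq_false_iff, Ne, isPrefixOf_bs]
          rintro ⟨t', ht'⟩; exact hc (by injection ht')
        rw [if_neg (by simp [hp])]
        have hrec := ih f (c :: cur) acc (by simpa using Nat.lt_of_succ_lt_succ h)
        rw [hrec]
        cases hst : splitBS t with
        | nil => exact absurd hst (splitBS_ne_nil t)
        | cons p ps =>
          rw [splitBS_cons c t p ps hc hst]
          simp [hst]

theorem splitOn_eq_splitBS (cs : List Char) :
    PySem.Chars.splitOn cs ['\\'] = splitBS cs := by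
  have := splitOn_go_eq cs (cs.length + 1) [] [] (by omega)
  rw [PySem.Chars.splitOn, this]
  cases h : splitBS cs with
  | nil => exact absurd h (splitBS_ne_nil cs)
  | cons p ps => simp

theorem splitBS_no_sep (cs : List Char) (h : '\\' ∉ cs) : splitBS cs = [cs] := by
  induction cs with
  | nil => rfl
  | cons c t ih =>
    simp only [List.mem_cons, not_or] at h
    have hc : ¬ c = '\\' := fun hh => h.1 hh.symm
    rw [splitBS_cons c t t [] hc (ih h.2)]

theorem splitBS_append (u v : List Char) :
    splitBS (u ++ '\\' :: v) = splitBS u ++ splitBS v := by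
  induction u with
  | nil => simp [splitBS_cons_bs, splitBS_nil]
  | cons c t ih =>
    by_cases hc : c = '\\'
    · subst hc
      simp only [List.cons_append, splitBS_cons_bs, ih]
    · cases hst : splitBS t with
      | nil => exact absurd hst (splitBS_ne_nil t)
      | cons p ps =>
        have h2 : splitBS (t ++ '\\' :: v) = p :: (ps ++ splitBS v) := by
          rw [ih, hst]; simp
        rw [List.cons_append, splitBS_cons c _ p (ps ++ splitBS v) hc h2,
          splitBS_cons c t p ps hc hst]
        simp

-- decomposition at the last backslash
theorem exists_last_bs (cs : List Char) (h : '\\' ∈ cs) :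
    ∃ u w, cs = u ++ '\\' :: w ∧ '\\' ∉ w := by
  induction cs with
  | nil => simp at h
  | cons c t ih =>
    by_cases ht : '\\' ∈ t
    · obtain ⟨u, w, h1, h2⟩ := ih ht
      exact ⟨c :: u, w, by simp [h1], h2⟩
    · have hc : c = '\\' := by
        rcases List.mem_cons.1 h with h' | h'
        · exact h'.symm
        · exact absurd h' ht
      exact ⟨[], t, by simp [hc], ht⟩

theorem rfind_go_no_sep (s : List Char) (h : '\\' ∉ s) :
    ∀ j, PySem.Chars.rfind.go s ['\\'] j = -1 := by
  intro j
  induction j with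
  | zero =>
    rw [PySem.Chars.rfind.go]
    rw [if_neg]
    rw [Bool.not_eq_true, Bool.eq_false_iff, Ne, isPrefixOf_bs]
    rintro ⟨t, ht⟩
    exact h (ht ▸ List.mem_cons_self)
  | succ j ih =>
    rw [PySem.Chars.rfind.go]
    rw [if_neg, ih]
    rw [Bool.not_eq_true, Bool.eq_false_iff, Ne, isPrefixOf_bs]
    rintro ⟨t, ht⟩
    have : '\\' ∈ s.drop (j + 1) := ht ▸ List.mem_cons_self
    exact h (List.mem_of_mem_drop this)

theorem rfind_no_sep (s : List Char) (h : '\\' ∉ s) :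
    PySem.Chars.rfind s ['\\'] = -1 := by
  rw [PySem.Chars.rfind]; exact rfind_go_no_sep s h _

theorem rfind_go_last (u w : List Char) (hw : '\\' ∉ w) :
    ∀ j, u.length ≤ j → PySem.Chars.rfind.go (u ++ '\\' :: w) ['\\'] j = (u.length : Int) := by
  intro j
  induction j with
  | zero =>
    intro hj
    have hu : u = [] := List.eq_nil_of_length_eq_zero (Nat.le_zero.1 hj)
    subst hu
    rw [PySem.Chars.rfind.go, if_pos]
    · rfl
    · rw [isPrefixOf_bs]; exact ⟨w, rfl⟩
  | succ j ih =>
    intro hj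
    rw [PySem.Chars.rfind.go]
    by_cases he : u.length = j + 1
    · rw [if_pos, he]
      rw [isPrefixOf_bs]
      refine ⟨w, ?_⟩
      rw [← he, List.drop_append_of_le_length (le_refl _), List.drop_length]
      simp
    · have hle : u.length ≤ j := by omega
      rw [if_neg, ih hle]
      rw [Bool.not_eq_true, Bool.eq_false_iff, Ne, isPrefixOf_bs]
      rintro ⟨t, ht⟩
      have hdrop : (u ++ '\\' :: w).drop (j + 1) = w.drop (j - u.length) := by
        rw [List.drop_append]
        rw [List.drop_eq_nil_of_le (by omega), List.nil_append]
        have h1 : j + 1 - u.length = (j - u.length) + 1 := by omega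
        rw [h1, List.drop_succ_cons]
      rw [hdrop] at ht
      have : '\\' ∈ w := List.mem_of_mem_drop (ht ▸ List.mem_cons_self)
      exact hw this

theorem join_single (x : List Char) : PySem.Chars.join ['.'] [x] = x := by
  simp [PySem.Chars.join, List.intercalate, List.intersperse]

theorem join_cons2 (x y : List Char) (ys : List (List Char)) :
    PySem.Chars.join ['.'] (x :: y :: ys) = x ++ '.' :: PySem.Chars.join ['.'] (y :: ys) := by
  simp [PySem.Chars.join, List.intercalate]

theorem join_cons_head (a : Char) (x : List Char) (xs : List (List Char)) :
    PySem.Chars.join ['.'] ((a :: x) :: xs) = a :: PySem.Chars.join ['.'] (x :: xs) := by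
  cases xs with
  | nil => rw [join_single, join_single]
  | cons y ys => rw [join_cons2, join_cons2, List.cons_append]

theorem join_append_last (X : List (List Char)) (w : List Char) (hX : X ≠ []) :
    PySem.Chars.join ['.'] (X ++ [w]) = PySem.Chars.join ['.'] X ++ '.' :: w := by
  induction X with
  | nil => exact absurd rfl hX
  | cons x X ih =>
    cases X with
    | nil => simp [join_cons2, join_single]
    | cons y Y =>
      have ih' := ih (by simp)
      simp only [List.cons_append] at ih' ⊢
      rw [join_cons2, join_cons2, ih', List.append_assoc]
      rfl

theorem join_map_lower (u : List Char) :
    PySem.Chars.join ['.'] ((splitBS u).map PySem.Chars.lower) = u.map convBS := by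
  induction u with
  | nil =>
    rw [splitBS_nil, List.map_cons, List.map_nil, join_single]
    simp [PySem.Chars.lower]
  | cons c t ih =>
    by_cases hc : c = '\\'
    · subst hc
      rw [splitBS_cons_bs]
      cases hst : splitBS t with
      | nil => exact absurd hst (splitBS_ne_nil t)
      | cons p ps =>
        rw [hst, List.map_cons] at ih
        rw [List.map_cons, List.map_cons,
          show PySem.Chars.lower [] = [] from rfl, join_cons2, ih]
        simp [convBS]
    · cases hst : splitBS t with
      | nil => exact absurd hst (splitBS_ne_nil t)
      | cons p ps =>
        rw [hst, List.map_cons] at ih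
        rw [splitBS_cons c t p ps hc hst, List.map_cons,
          show PySem.Chars.lower (c :: p) = PySem.Chars.lowerChar c :: PySem.Chars.lower p from rfl,
          join_cons_head, ih]
        simp [convBS, hc]

theorem lowerChar_bs_iff (c : Char) : PySem.Chars.lowerChar c = '\\' ↔ c = '\\' := by
  constructor
  · intro h
    rw [PySem.Chars.lowerChar] at h
    split_ifs at h with hu
    · exfalso
      rw [PySem.Chars.isupper] at hu
      simp only [Bool.and_eq_true, decide_eq_true_eq] at hu
      have h1 : ('A' : Char).toNat ≤ c.toNat := hu.1
      have h2 : c.toNat ≤ ('Z' : Char).toNat := hu.2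
      have hA : ('A' : Char).toNat = 65 := rfl
      have hZ : ('Z' : Char).toNat = 90 := rfl
      have hv : (c.toNat + 32).isValidChar := by left; omega
      have h3 := congrArg Char.toNat h
      rw [Char.toNat_ofNat, if_pos hv] at h3
      have h4 : ('\\' : Char).toNat = 92 := rfl
      omega
    · exact h
  · intro h
    subst h
    rw [PySem.Chars.lowerChar, if_neg (by decide)]

theorem conv_pointwise (c : Char) :
    (if PySem.Chars.lowerChar c = '\\' then '.' else PySem.Chars.lowerChar c) = convBS c := by
  by_cases hc : c = '\\'
  · subst hc; rw [if_pos ((lowerChar_bs_iff _).2 rfl)]; simp [convBS]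
  · rw [if_neg (fun h => hc ((lowerChar_bs_iff _).1 h))]; simp [convBS, hc]

theorem replace_go_eq (l : List Char) : ∀ (fuel : Nat) (acc : List Char), l.length ≤ fuel →
    PySem.Chars.replace.go ['\\'] ['.'] fuel l acc =
      acc.reverse ++ l.map (fun c => if c = '\\' then '.' else c) := by
  induction l with
  | nil =>
    intro fuel acc h
    match fuel with
    | 0 => simp [PySem.Chars.replace.go]
    | f + 1 => simp [PySem.Chars.replace.go]
  | cons c t ih =>
    intro fuel acc h
    match fuel with
    | f + 1 =>
      rw [PySem.Chars.replace.go]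
      by_cases hc : c = '\\'
      · rw [if_pos (by rw [List.isPrefixOf_iff_prefix, List.cons_prefix_cons]; exact ⟨hc.symm, by simp⟩)]
        have hrec := ih f ('.' :: acc) (by simpa using Nat.le_of_succ_le_succ h)
        simp only [List.length_cons, List.length_nil, Nat.zero_add, List.drop_succ_cons,
          List.drop_zero, List.reverse_cons, List.reverse_nil, List.nil_append,
          List.singleton_append] at hrec ⊢
        rw [hrec]
        simp [hc]
      · rw [if_neg (fun hp => hc (by
          rw [List.isPrefixOf_iff_prefix, List.cons_prefix_cons] at hp
          exact hp.1.symm))]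
        rw [ih f (c :: acc) (by simpa using Nat.le_of_succ_le_succ h)]
        simp [hc]

theorem replace_lower_eq (u : List Char) :
    PySem.Chars.replace (PySem.Chars.lower u) ['\\'] ['.'] = u.map convBS := by
  rw [PySem.Chars.replace, if_neg (by simp)]
  rw [replace_go_eq _ _ _ (le_refl _)]
  rw [show PySem.Chars.lower u = u.map PySem.Chars.lowerChar from rfl]
  simp only [List.reverse_nil, List.nil_append, List.map_map]
  exact List.map_congr_left (fun c _ => conv_pointwise c)

theorem slice_init {α : Type} (xs : List α) : PySem.List.slice xs none (some (-1)) = xs.dropLast := by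
  simp only [PySem.List.slice, PySem.List.clampIdx]
  rw [List.dropLast_eq_take]
  congr 1
  split_ifs with h2 h3
  · have : xs.length = 0 := by
      by_contra hne
      have : (1:Int) ≤ xs.length := by exact_mod_cast Nat.one_le_iff_ne_zero.2 hne
      omega
    omega
  · omega
  · omega

theorem slice_last {α : Type} (X : List α) (w : α) :
    PySem.List.slice (X ++ [w]) (some (-1)) none = [w] := by
  simp only [PySem.List.slice, PySem.List.clampIdx]
  have hlen : (X ++ [w]).length = X.length + 1 := by simp
  rw [hlen]
  have h2 : ¬ (((X.length + 1 : Nat) : Int) + -1 < 0) := by push_cast; omega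
  rw [if_neg h2]
  have h3 : ((X.length + 1 : Nat) : Int) + -1 = (X.length : Int) := by push_cast; ring
  rw [h3, Int.toNat_natCast]
  rw [if_pos (show (-1:Int) < 0 by norm_num)]
  rw [show List.drop X.length (X ++ [w]) = [w] from List.drop_left,
    show X.length + 1 - X.length = 1 by omega]
  rfl

theorem foldl_append_lower (l : List (List Char)) :
    ∀ acc, l.foldl (fun acc d => acc ++ [PySem.Chars.lower d]) acc = acc ++ l.map PySem.Chars.lower := by
  induction l with
  | nil => simp
  | cons p ps ih => intro acc; simp [List.foldl_cons, ih]

-- ===== VERDICT (by name: the statement is the Claim_ definition above) =====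
theorem to_lower_spec : Claim_equal_to_lower := by
  intro txt _
  unfold Spec_to_lower
  simp only [to_lower, to_lower_alt]
  by_cases h0 : PySem.Str.len txt = 0
  · rw [if_pos h0, if_pos h0]
  · rw [if_neg h0, if_neg h0]
    by_cases hbs : '\\' ∈ txt.toList
    · obtain ⟨u, w, hcs, hw⟩ := exists_last_bs _ hbs
      have hsplV : PySem.Chars.splitOn txt.toList ['\\'] = splitBS u ++ [w] := by
        rw [splitOn_eq_splitBS, hcs, splitBS_append, splitBS_no_sep w hw]
      have hrf : PySem.Chars.rfind txt.toList ['\\'] = (u.length : Int) := by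
        rw [hcs, PySem.Chars.rfind]
        exact rfind_go_last u w hw _ (by simp)
      have hlen1 : ¬ (splitBS u ++ [w]).length = 1 := by
        cases h : splitBS u with
        | nil => exact absurd h (splitBS_ne_nil u)
        | cons p ps => simp
      have hne : ¬ ((u.length : Int) = -1) := by omega
      rw [hsplV, hrf, if_neg hlen1, if_neg hne]
      rw [slice_init, List.dropLast_concat, slice_last, foldl_append_lower,
        List.nil_append, List.headD_cons]
      rw [join_append_last _ w (by
        simpa [List.map_eq_nil_iff] using splitBS_ne_nil u)]
      rw [join_map_lower]
      rw [Int.toNat_natCast, hcs, List.take_left, replace_lower_eq]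
      rw [show (u ++ '\\' :: w).drop (u.length + 1) = w by
        rw [List.drop_append, List.drop_eq_nil_of_le (Nat.le_succ _), List.nil_append,
          show u.length + 1 - u.length = 1 by omega, List.drop_succ_cons, List.drop_zero]]
      rw [List.append_assoc, List.singleton_append]
    · rw [splitOn_eq_splitBS, splitBS_no_sep _ hbs, rfind_no_sep _ hbs,
        if_pos rfl, if_pos (by simp)]
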